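-- pv_equiv track=rewrite | github.com/dw763j/PinTrace | scripts/run_neighbor_version_experiment.py | _generate_offset_vectors
-- ===== SOURCE A (Python) =====
-- def _generate_offset_vectors(
--     dims: int,
--     neighbor_n: int,
--     max_candidates_k: int,
-- ) -> list[tuple[int, ...]]:
--     """Generate bounded offset vectors sorted by L1 distance.
--
--     We cannot enumerate the full ``(2N+1)^dims`` grid (memory blow-up); instead enumerate
--     increasing L1 shells until ``max_candidates_k`` offsets are collected.
--     """
--     if dims <= 0:
--         return []
--     if neighbor_n <= 0 or max_candidates_k <= 0:
--         return []
--
--     max_l1 = dims * neighbor_n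
--     results: list[tuple[int, ...]] = []
--
--     def build_at_l1(target_l1: int) -> None:
--         cur = [0] * dims
--
--         def dfs(i: int, remain_l1: int, nonzero_used: int) -> None:
--             if len(results) >= max_candidates_k:
--                 return
--             if i == dims:
--                 if remain_l1 == 0 and nonzero_used > 0:
--                     results.append(tuple(cur))
--                 return
--
--             # Prune: each remaining dim can contribute at most neighbor_n in absolute value
--             rest_dims = dims - i
--             if remain_l1 > rest_dims * neighbor_n:
--                 return
--
--             # Try zero first so fewer libraries change early
--             cur[i] = 0
--             dfs(i + 1, remain_l1, nonzero_used)
--             if len(results) >= max_candidates_k: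
--                 return
--
--             # Then non-zero offsets sorted by |v| with negatives first for stable ordering
--             upper = min(neighbor_n, remain_l1)
--             for abs_v in range(1, upper + 1):
--                 for v in (-abs_v, abs_v):
--                     cur[i] = v
--                     dfs(i + 1, remain_l1 - abs_v, nonzero_used + 1)
--                     if len(results) >= max_candidates_k:
--                         return
--
--             cur[i] = 0
--
--         dfs(0, target_l1, 0)
--
--     for l1 in range(1, max_l1 + 1):
--         build_at_l1(l1)
--         if len(results) >= max_candidates_k:
--             break
--     return results
-- ===== SOURCE B (Python) =====
-- def _generate_offset_vectors(dims, neighbor_n, max_candidates_k):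
--     """Pure counted enumeration per L1 shell instead of a stateful DFS with a shared
--     mutable results list and early-exit checks threaded through the recursion."""
--     if dims <= 0:
--         return []
--     if neighbor_n <= 0 or max_candidates_k <= 0:
--         return []
--
--     def take_vecs(cnt, left, remain, prefix):
--         # First `cnt` full vectors extending `prefix` by `left` more coordinates in
--         # [-neighbor_n, neighbor_n] of total L1 norm exactly `remain`, each added
--         # coordinate ordered 0 first, then -1, 1, -2, 2, ...
--         if cnt <= 0 or remain > left * neighbor_n:
--             return []
--         if left == 0:
--             return [prefix] if remain == 0 else []
--         out = take_vecs(cnt, left - 1, remain, prefix + (0,))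
--         for a in range(1, min(neighbor_n, remain) + 1):
--             for v in (-a, a):
--                 if len(out) >= cnt:
--                     return out
--                 out += take_vecs(cnt - len(out), left - 1, remain - a, prefix + (v,))
--         return out
--
--     results = []
--     for l1 in range(1, dims * neighbor_n + 1):
--         results += take_vecs(max_candidates_k - len(results), dims, l1, ())
--         if len(results) >= max_candidates_k:
--             return results
--     return results
-- ===== Notes on version B (the rewrite author's own statement) =====
-- stated objective: alternative
-- what changed: Replaced the stateful DFS (shared mutable results list, in-place cur array, early-exit checks threaded through the recursion and both loops) with a pure counted enumerator that returns at most the needed number of each shell's vectors, plus one accumulation loop.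
import Mathlib
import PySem

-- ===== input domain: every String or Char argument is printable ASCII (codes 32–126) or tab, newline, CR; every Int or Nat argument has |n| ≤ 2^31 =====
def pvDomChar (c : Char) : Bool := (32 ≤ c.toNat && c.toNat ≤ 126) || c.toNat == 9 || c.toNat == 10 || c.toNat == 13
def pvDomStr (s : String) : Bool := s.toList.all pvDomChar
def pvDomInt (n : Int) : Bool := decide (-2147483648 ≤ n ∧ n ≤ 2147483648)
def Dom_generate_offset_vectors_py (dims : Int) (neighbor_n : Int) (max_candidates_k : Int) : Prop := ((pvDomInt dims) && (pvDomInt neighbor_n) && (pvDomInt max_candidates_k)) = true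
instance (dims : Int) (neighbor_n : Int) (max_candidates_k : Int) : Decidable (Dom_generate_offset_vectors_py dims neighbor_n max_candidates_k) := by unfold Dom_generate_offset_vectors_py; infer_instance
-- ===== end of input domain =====

-- B replaces A's stateful DFS (shared mutable results list, in-place cur array, early-exit
-- checks threaded through the recursion and both loops) with a pure counted enumerator
-- returning at most cnt vectors per shell, plus one accumulation loop; objective: alternative.

-- ===== PORT A =====
-- A's inner `dfs` closure: `cur` is modelled by the pfx of chosen values `pre` (at emit time,
-- i == dims, every slot of `cur` equals `pre`); `fuel` makes the recursion total — on real calls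
-- i + fuel = dims, so the fuel-exhausted branch is unreachable (the i == dims test fires first).
def dfsA (dims n k : Int) : Nat → Int → List Int → Int → Int → List (List Int) → List (List Int)
  | 0, i, pre, remain, nz, res =>
    if k ≤ (res.length : Int) then res
    else if i = dims then (if remain = 0 ∧ 0 < nz then res ++ [pre] else res)
    else res
  | f + 1, i, pre, remain, nz, res =>
    if k ≤ (res.length : Int) then res
    else if i = dims then (if remain = 0 ∧ 0 < nz then res ++ [pre] else res)
    else if (dims - i) * n < remain then res
    else
      let res1 := dfsA dims n k f (i + 1) (pre ++ [0]) remain nz res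
      if k ≤ (res1.length : Int) then res1
      else
        -- for abs_v in range(1, upper+1): for v in (-abs_v, abs_v): (break-on-full = guarded body)
        (PySem.List.pyRange 1 (min n remain + 1) 1).foldl (fun r a =>
          [-a, a].foldl (fun r v =>
            if k ≤ (r.length : Int) then r
            else dfsA dims n k f (i + 1) (pre ++ [v]) (remain - a) (nz + 1) r) r) res1

-- A's outer loop `for l1 in range(1, max_l1+1): build_at_l1(l1); break if full`
-- (Python's range is lazy, so the loop is ported as a counting recursion, not a list)
def outerA (dims n k maxl1 l1 : Int) (res : List (List Int)) : List (List Int) :=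
  if _h : maxl1 < l1 then res
  else if k ≤ ((dfsA dims n k dims.toNat 0 [] l1 0 res).length : Int) then
    dfsA dims n k dims.toNat 0 [] l1 0 res
  else outerA dims n k maxl1 (l1 + 1) (dfsA dims n k dims.toNat 0 [] l1 0 res)
termination_by (maxl1 + 1 - l1).toNat
decreasing_by omega

def generate_offset_vectors_py (dims : Int) (neighbor_n : Int) (max_candidates_k : Int) : List (List Int) :=
  if dims ≤ 0 then []
  else if neighbor_n ≤ 0 ∨ max_candidates_k ≤ 0 then []
  else outerA dims neighbor_n max_candidates_k (dims * neighbor_n) 1 []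

-- ===== PORT B =====
-- B's `take_vecs(cnt, left, remain, pfx)`; the two python `for` loops with `return out`
-- on a full accumulator become guarded folds (a guarded body is the identity once full).
def takeVecs (n : Int) : Int → Nat → Int → List Int → List (List Int)
  | cnt, 0, remain, pfx =>
    if cnt ≤ 0 ∨ (0 : Int) * n < remain then []
    else if remain = 0 then [pfx] else []
  | cnt, left + 1, remain, pfx =>
    if cnt ≤ 0 ∨ ((left : Int) + 1) * n < remain then []
    else
      (PySem.List.pyRange 1 (min n remain + 1) 1).foldl (fun out a =>
        [-a, a].foldl (fun out v =>
          if cnt ≤ (out.length : Int) then out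
          else out ++ takeVecs n (cnt - out.length) left (remain - a) (pfx ++ [v])) out)
        (takeVecs n cnt left remain (pfx ++ [0]))

-- B's outer loop: `results += take_vecs(k - len(results), dims, l1, ()); return if full`
-- (Python's range is lazy, so the loop is ported as a counting recursion, not a list)
def outerB (dims n k maxl1 l1 : Int) (res : List (List Int)) : List (List Int) :=
  if _h : maxl1 < l1 then res
  else if k ≤ (((res ++ takeVecs n (k - res.length) dims.toNat l1 []).length) : Int) then
    res ++ takeVecs n (k - res.length) dims.toNat l1 []
  else outerB dims n k maxl1 (l1 + 1) (res ++ takeVecs n (k - res.length) dims.toNat l1 [])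
termination_by (maxl1 + 1 - l1).toNat
decreasing_by omega

def generate_offset_vectors_py_alt (dims : Int) (neighbor_n : Int) (max_candidates_k : Int) : List (List Int) :=
  if dims ≤ 0 then []
  else if neighbor_n ≤ 0 ∨ max_candidates_k ≤ 0 then []
  else outerB dims neighbor_n max_candidates_k (dims * neighbor_n) 1 []

-- ===== PRECONDITION & SPEC =====
-- Pre_ excludes dims > 900 with positive neighbor_n and max_candidates_k: there A recurses once per
-- dimension and hits CPython's recursion limit (RecursionError) around dims ~ 996; the exact cutoff
-- depends on the interpreter's stack state and configured recursion limit, so a safety margin is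
-- kept (a thin band of large-dims inputs on which A still returns is excluded by that margin).
def Pre_generate_offset_vectors_py (dims : Int) (neighbor_n : Int) (max_candidates_k : Int) : Prop :=
  dims ≤ 900 ∨ neighbor_n ≤ 0 ∨ max_candidates_k ≤ 0
instance (dims : Int) (neighbor_n : Int) (max_candidates_k : Int) : Decidable (Pre_generate_offset_vectors_py dims neighbor_n max_candidates_k) := by unfold Pre_generate_offset_vectors_py; infer_instance
def pvWitness_generate_offset_vectors_py : Int × Int × Int := (2, 1, 8)

def Spec_generate_offset_vectors_py (dims : Int) (neighbor_n : Int) (max_candidates_k : Int) (out : List (List Int)) : Prop := out = generate_offset_vectors_py_alt dims neighbor_n max_candidates_k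
instance (dims : Int) (neighbor_n : Int) (max_candidates_k : Int) (out : List (List Int)) : Decidable (Spec_generate_offset_vectors_py dims neighbor_n max_candidates_k out) := by unfold Spec_generate_offset_vectors_py; infer_instance

-- ===== CLAIM (what is proved, stated in full; the proofs are below) =====
def Claim_equal_generate_offset_vectors_py : Prop := ∀ (dims : Int) (neighbor_n : Int) (max_candidates_k : Int), Dom_generate_offset_vectors_py dims neighbor_n max_candidates_k → Pre_generate_offset_vectors_py dims neighbor_n max_candidates_k → Spec_generate_offset_vectors_py dims neighbor_n max_candidates_k (generate_offset_vectors_py dims neighbor_n max_candidates_k)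

-- ===== LEMMAS AND PROOFS =====

-- Ghost enumeration (proof-only): ALL vectors of length `left`, entries in [-n, n], L1 norm
-- exactly `remain`, in the common order of A's dfs and B's take_vecs (0 first, then -1, 1, ...).
def vecsB (n : Int) : Nat → Int → List (List Int)
  | 0, remain => if remain = 0 then [[]] else []
  | left + 1, remain =>
    if ((left : Int) + 1) * n < remain then []
    else
      (vecsB n left remain).map (fun r => 0 :: r) ++
      (PySem.List.pyRange 1 (min n remain + 1) 1).flatMap (fun a =>
        [-a, a].flatMap (fun v => (vecsB n left (remain - a)).map (fun r => v :: r)))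

-- one-step unfoldings of vecsB (well-founded equations, keep simp away from them)
theorem vecsB_zero (n remain : Int) : vecsB n 0 remain = if remain = 0 then [[]] else [] := by
  rw [vecsB]

theorem vecsB_succ (n : Int) (left : Nat) (remain : Int) :
    vecsB n (left + 1) remain =
      if ((left : Int) + 1) * n < remain then []
      else
        (vecsB n left remain).map (fun r => 0 :: r) ++
        (PySem.List.pyRange 1 (min n remain + 1) 1).flatMap (fun a =>
          [-a, a].flatMap (fun v => (vecsB n left (remain - a)).map (fun r => v :: r))) := by
  rw [vecsB]

-- filling `res` from A, then continuing with `B`, is filling from `A ++ B`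
theorem take_chain (k : Int) (res A B : List (List Int)) (h : (res.length : Int) < k) :
    (res ++ A.take ((k - (res.length : Int)).toNat)) ++
      B.take ((k - (((res ++ A.take ((k - (res.length : Int)).toNat)).length : Int))).toNat)
    = res ++ (A ++ B).take ((k - (res.length : Int)).toNat) := by
  rw [List.take_append]
  have h2 : (k - (((res ++ A.take ((k - (res.length : Int)).toNat)).length : Int))).toNat
      = (k - (res.length : Int)).toNat - A.length := by
    simp only [List.length_append, List.length_take]
    omega
  rw [h2, List.append_assoc]

-- one-step unfoldings of takeVecs (its equations are well-founded, keep simp away from them)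
theorem takeVecs_zero (n cnt remain : Int) (pfx : List Int) :
    takeVecs n cnt 0 remain pfx =
      if cnt ≤ 0 ∨ (0 : Int) * n < remain then []
      else if remain = 0 then [pfx] else [] := by
  rw [takeVecs]

theorem takeVecs_succ (n cnt : Int) (left : Nat) (remain : Int) (pfx : List Int) :
    takeVecs n cnt (left + 1) remain pfx =
      if cnt ≤ 0 ∨ ((left : Int) + 1) * n < remain then []
      else
        (PySem.List.pyRange 1 (min n remain + 1) 1).foldl (fun out a =>
          [-a, a].foldl (fun out v =>
            if cnt ≤ (out.length : Int) then out
            else out ++ takeVecs n (cnt - out.length) left (remain - a) (pfx ++ [v])) out)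
          (takeVecs n cnt left remain (pfx ++ [0])) := by
  rw [takeVecs]

-- B's counted enumerator returns exactly the first cnt vectors of the ghost enumeration
theorem takeVecs_eq (n : Int) : ∀ (left : Nat) (cnt remain : Int) (pfx : List Int),
    takeVecs n cnt left remain pfx =
      ((vecsB n left remain).map (fun r => pfx ++ r)).take cnt.toNat := by
  intro left
  induction left with
  | zero =>
    intro cnt remain pfx
    rw [takeVecs_zero]
    by_cases hc : cnt ≤ 0
    · simp [hc, Int.toNat_of_nonpos hc]
    · have h1 : cnt.toNat = (cnt - 1).toNat + 1 := by omega
      rw [h1]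
      by_cases hr : remain = 0
      · simp [vecsB_zero, hc, hr]
      · by_cases hp : (0 : Int) * n < remain <;> simp [vecsB_zero, hc, hr]
  | succ left ih =>
    intro cnt remain pfx
    by_cases hc : cnt ≤ 0
    · rw [takeVecs_succ]; simp [hc, Int.toNat_of_nonpos hc]
    · by_cases hp : ((left : Int) + 1) * n < remain
      · rw [takeVecs_succ]; simp [vecsB_succ, hc, hp]
      · rw [show takeVecs n cnt (left + 1) remain pfx =
            (PySem.List.pyRange 1 (min n remain + 1) 1).foldl (fun out a =>
              [-a, a].foldl (fun out v =>
                if cnt ≤ (out.length : Int) then out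
                else out ++ takeVecs n (cnt - out.length) left (remain - a) (pfx ++ [v])) out)
              (takeVecs n cnt left remain (pfx ++ [0])) from by
          rw [takeVecs_succ]; simp [hc, hp]]
        have hR : ((vecsB n (left + 1) remain).map (fun r => pfx ++ r)) =
            (vecsB n left remain).map (fun r => (pfx ++ [0]) ++ r) ++
            (PySem.List.pyRange 1 (min n remain + 1) 1).flatMap (fun a =>
              (vecsB n left (remain - a)).map (fun r => (pfx ++ [-a]) ++ r) ++
              (vecsB n left (remain - a)).map (fun r => (pfx ++ [a]) ++ r)) := by
          simp [vecsB_succ, hp, List.map_append, List.map_flatMap, List.map_map,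
            Function.comp_def, List.append_assoc]
        rw [hR]
        have h0 : takeVecs n cnt left remain (pfx ++ [0]) =
            ((vecsB n left remain).map (fun r => (pfx ++ [0]) ++ r)).take cnt.toNat := ih ..
        -- loop invariant: the accumulator is always the first cnt of what has been enumerated
        have loop : ∀ (la : List Int) (L out : List (List Int)), out = L.take cnt.toNat →
            la.foldl (fun out a =>
              [-a, a].foldl (fun out v =>
                if cnt ≤ (out.length : Int) then out
                else out ++ takeVecs n (cnt - out.length) left (remain - a) (pfx ++ [v])) out)
              out =
            (L ++ la.flatMap (fun a =>
              (vecsB n left (remain - a)).map (fun r => (pfx ++ [-a]) ++ r) ++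
              (vecsB n left (remain - a)).map (fun r => (pfx ++ [a]) ++ r))).take cnt.toNat := by
          intro la
          induction la with
          | nil => intro L out hout; simp [hout]
          | cons a as iha =>
            intro L out hout
            have key : ∀ (v : Int) (L out : List (List Int)), out = L.take cnt.toNat →
                (if cnt ≤ (out.length : Int) then out
                 else out ++ takeVecs n (cnt - out.length) left (remain - a) (pfx ++ [v])) =
                (L ++ (vecsB n left (remain - a)).map (fun r => (pfx ++ [v]) ++ r)).take cnt.toNat := by
              intro v L out hout
              by_cases hfull : cnt ≤ (out.length : Int)
              · have hL : cnt.toNat ≤ L.length := by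
                  have := congrArg List.length hout
                  simp [List.length_take] at this
                  omega
                rw [if_pos hfull, List.take_append_of_le_length hL, ← hout]
              · rw [if_neg hfull, ih (cnt - (out.length : Int)) (remain - a) (pfx ++ [v])]
                have hch := take_chain cnt ([] : List (List Int)) L
                  ((vecsB n left (remain - a)).map (fun r => (pfx ++ [v]) ++ r))
                  (by simp; omega)
                simp only [List.nil_append, List.length_nil, Nat.cast_zero, Int.sub_zero] at hch
                rw [hout, hch]
            rw [List.foldl_cons]
            rw [show [-a, a].foldl (fun out v =>
                if cnt ≤ (out.length : Int) then out
                else out ++ takeVecs n (cnt - out.length) left (remain - a) (pfx ++ [v])) out =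
              (L ++ ((vecsB n left (remain - a)).map (fun r => (pfx ++ [-a]) ++ r) ++
                     (vecsB n left (remain - a)).map (fun r => (pfx ++ [a]) ++ r))).take cnt.toNat from by
              simp only [List.foldl_cons, List.foldl_nil]
              rw [key (-a) L out hout,
                  key a (L ++ (vecsB n left (remain - a)).map (fun r => (pfx ++ [-a]) ++ r)) _ rfl,
                  List.append_assoc]]
            rw [iha _ _ rfl]
            simp [List.flatMap_cons, List.append_assoc]
        rw [h0, loop _ ((vecsB n left remain).map (fun r => (pfx ++ [0]) ++ r)) _ rfl]

-- Core correspondence: A's dfs from a state appends the first (k - len res) vectors of the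
-- ghost enumeration below that state (prefixed with the already chosen values).
theorem dfs_eq (dims n k : Int) : ∀ (f : Nat) (i : Int) (pre : List Int) (remain nz : Int)
    (res : List (List Int)), i + (f : Int) = dims → 0 ≤ nz → (0 < nz ∨ 0 < remain) →
    (res.length : Int) < k →
    dfsA dims n k f i pre remain nz res =
      res ++ ((vecsB n f remain).map (fun r => pre ++ r)).take ((k - (res.length : Int)).toNat) := by
  intro f
  induction f with
  | zero =>
    intro i pre remain nz res hi hnz hinv hres
    have hid : i = dims := by omega
    by_cases hr : remain = 0
    · have hpos : 0 < nz := by omega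
      have h1 : (k - (res.length : Int)).toNat = (k - (res.length : Int) - 1).toNat + 1 := by omega
      rw [h1]
      simp [dfsA, vecsB_zero, hid, hr, hpos, not_le.mpr hres]
    · simp [dfsA, vecsB_zero, hid, hr, not_le.mpr hres]
  | succ g ih =>
    intro i pre remain nz res hi hnz hinv hres
    have hne : ¬ (i = dims) := by omega
    have hdi : dims - i = (g : Int) + 1 := by omega
    by_cases hprune : (dims - i) * n < remain
    · have hp' : ((g : Int) + 1) * n < remain := by rw [← hdi]; exact hprune
      simp [dfsA, vecsB_succ, hne, hprune, hp', not_le.mpr hres]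
    · have hp' : ¬ (((g : Int) + 1) * n < remain) := by rw [← hdi]; exact hprune
      rw [show dfsA dims n k (g+1) i pre remain nz res =
          (if k ≤ ((dfsA dims n k g (i+1) (pre ++ [0]) remain nz res).length : Int) then
             dfsA dims n k g (i+1) (pre ++ [0]) remain nz res
           else
             (PySem.List.pyRange 1 (min n remain + 1) 1).foldl (fun r a =>
               [-a, a].foldl (fun r v =>
                 if k ≤ (r.length : Int) then r
                 else dfsA dims n k g (i+1) (pre ++ [v]) (remain - a) (nz + 1) r) r)
               (dfsA dims n k g (i+1) (pre ++ [0]) remain nz res)) from by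
        simp [dfsA, hne, hprune, not_le.mpr hres]]
      have hR : ((vecsB n (g + 1) remain).map (fun r => pre ++ r)) =
          (vecsB n g remain).map (fun r => (pre ++ [0]) ++ r) ++
          (PySem.List.pyRange 1 (min n remain + 1) 1).flatMap (fun a =>
            (vecsB n g (remain - a)).map (fun r => (pre ++ [-a]) ++ r) ++
            (vecsB n g (remain - a)).map (fun r => (pre ++ [a]) ++ r)) := by
        simp [vecsB_succ, hp', List.map_append, List.map_flatMap, List.map_map,
          Function.comp_def, List.append_assoc]
      rw [hR]
      have h0 := ih (i+1) (pre ++ [0]) remain nz res (by omega) hnz hinv hres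
      by_cases hfull : k ≤ ((dfsA dims n k g (i+1) (pre ++ [0]) remain nz res).length : Int)
      · rw [if_pos hfull]
        have hL : (k - (res.length : Int)).toNat ≤
            ((vecsB n g remain).map (fun r => (pre ++ [0]) ++ r)).length := by
          rw [h0] at hfull
          simp only [List.length_append, List.length_take] at hfull
          omega
        rw [List.take_append_of_le_length hL, ← h0]
      · rw [if_neg hfull]
        have loop : ∀ (la : List Int) (L r : List (List Int)),
            r = res ++ L.take ((k - (res.length : Int)).toNat) →
            la.foldl (fun r a =>
              [-a, a].foldl (fun r v =>
                if k ≤ (r.length : Int) then r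
                else dfsA dims n k g (i+1) (pre ++ [v]) (remain - a) (nz + 1) r) r) r =
            res ++ (L ++ la.flatMap (fun a =>
              (vecsB n g (remain - a)).map (fun r => (pre ++ [-a]) ++ r) ++
              (vecsB n g (remain - a)).map (fun r => (pre ++ [a]) ++ r))).take
                ((k - (res.length : Int)).toNat) := by
          intro la
          induction la with
          | nil => intro L r hr'; simp [hr']
          | cons a as iha =>
            intro L r hr'
            have key : ∀ (v : Int) (L r : List (List Int)),
                r = res ++ L.take ((k - (res.length : Int)).toNat) →
                (if k ≤ (r.length : Int) then r
                 else dfsA dims n k g (i+1) (pre ++ [v]) (remain - a) (nz + 1) r) =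
                res ++ (L ++ (vecsB n g (remain - a)).map (fun r => (pre ++ [v]) ++ r)).take
                  ((k - (res.length : Int)).toNat) := by
              intro v L r hr'
              by_cases hfull2 : k ≤ (r.length : Int)
              · have hL : (k - (res.length : Int)).toNat ≤ L.length := by
                  have := congrArg List.length hr'
                  simp [List.length_take] at this
                  omega
                rw [if_pos hfull2, List.take_append_of_le_length hL, ← hr']
              · rw [if_neg hfull2,
                    ih (i+1) (pre ++ [v]) (remain - a) (nz + 1) r (by omega) (by omega)
                      (by omega) (not_le.mp hfull2)]
                rw [hr', take_chain k res L
                  ((vecsB n g (remain - a)).map (fun r => (pre ++ [v]) ++ r)) hres]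
            rw [List.foldl_cons]
            rw [show [-a, a].foldl (fun r v =>
                if k ≤ (r.length : Int) then r
                else dfsA dims n k g (i+1) (pre ++ [v]) (remain - a) (nz + 1) r) r =
              res ++ (L ++ ((vecsB n g (remain - a)).map (fun r => (pre ++ [-a]) ++ r) ++
                     (vecsB n g (remain - a)).map (fun r => (pre ++ [a]) ++ r))).take
                ((k - (res.length : Int)).toNat) from by
              simp only [List.foldl_cons, List.foldl_nil]
              rw [key (-a) L r hr',
                  key a (L ++ (vecsB n g (remain - a)).map (fun r => (pre ++ [-a]) ++ r)) _ rfl,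
                  List.append_assoc]]
            rw [iha _ _ rfl]
            simp [List.flatMap_cons, List.append_assoc]
        rw [h0] at hfull ⊢
        exact loop _ ((vecsB n g remain).map (fun r => (pre ++ [0]) ++ r)) _ rfl

-- the outer loops agree shell by shell
theorem outer_eq (dims n k maxl1 : Int) (hd : 0 < dims) :
    ∀ (f : Nat) (l1 : Int) (res : List (List Int)), (maxl1 + 1 - l1).toNat = f → 0 < l1 →
    (res.length : Int) < k →
    outerA dims n k maxl1 l1 res = outerB dims n k maxl1 l1 res := by
  intro f
  induction f with
  | zero =>
    intro l1 res hf h1 hres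
    have hlt : maxl1 < l1 := by omega
    rw [outerA, outerB, dif_pos hlt, dif_pos hlt]
  | succ f ihf =>
    intro l1 res hf h1 hres
    have hnlt : ¬ maxl1 < l1 := by omega
    have hdfs := dfs_eq dims n k dims.toNat 0 [] l1 0 res (by omega) le_rfl (Or.inr h1) hres
    have htv : takeVecs n (k - (res.length : Int)) dims.toNat l1 [] =
        ((vecsB n dims.toNat l1).map (fun r => [] ++ r)).take (k - (res.length : Int)).toNat :=
      takeVecs_eq n dims.toNat (k - (res.length : Int)) l1 []
    rw [outerA, outerB, dif_neg hnlt, dif_neg hnlt, hdfs, htv]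
    split_ifs with hfull
    · rfl
    · exact ihf (l1 + 1) _ (by omega) (by omega) (not_le.mp hfull)

-- ===== VERDICT (by name: the statement is the Claim_ definition above) =====
theorem generate_offset_vectors_py_spec : Claim_equal_generate_offset_vectors_py := by
  intro dims n k _ _
  unfold Spec_generate_offset_vectors_py generate_offset_vectors_py generate_offset_vectors_py_alt
  by_cases h1 : dims ≤ 0
  · simp [h1]
  · by_cases h2 : n ≤ 0 ∨ k ≤ 0
    · simp [h1, h2]
    · simp only [h1, h2, if_false]
      exact outer_eq dims n k (dims * n) (by omega) _ 1 [] rfl (by omega) (by simp; omega)
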